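-- pv_equiv track=rewrite | github.com/tongosu/ddonilang | tools/scripts/_resolve_age5_combined_heavy_policy_bootstrap.py | _parse_bootstrap_cli
-- ===== SOURCE A (Python) =====
-- def _parse_bootstrap_cli(argv: list[str]) -> tuple[str, str]:
--     provider = "-"
--     output_format = "text"
--     for idx, token in enumerate(argv):
--         if token == "--provider" and idx + 1 < len(argv):
--             provider = str(argv[idx + 1]).strip() or "-"
--         elif token == "--format" and idx + 1 < len(argv):
--             output_format = str(argv[idx + 1]).strip() or "text"
--     return provider, output_format
-- ===== SOURCE B (Python) =====
-- def _last_value(argv, flag, default):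
--     # scan backwards: the first hit from the right is the last occurrence
--     for i in range(len(argv) - 2, -1, -1):
--         if argv[i] == flag:
--             value = argv[i + 1].strip()
--             return value if value else default
--     return default
--
--
-- def _parse_bootstrap_cli(argv: list[str]) -> tuple[str, str]:
--     return (_last_value(argv, "--provider", "-"),
--             _last_value(argv, "--format", "text"))
-- ===== Notes on version B (the rewrite author's own statement) =====
-- stated objective: simpler
-- what changed: Replaces the single interleaved forward fold over enumerate(argv) with two independent backward scans (a parameter-driven helper that returns at the first match from the right, i.e. the last occurrence), eliminating the mutable two-field state.
import Mathlib
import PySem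

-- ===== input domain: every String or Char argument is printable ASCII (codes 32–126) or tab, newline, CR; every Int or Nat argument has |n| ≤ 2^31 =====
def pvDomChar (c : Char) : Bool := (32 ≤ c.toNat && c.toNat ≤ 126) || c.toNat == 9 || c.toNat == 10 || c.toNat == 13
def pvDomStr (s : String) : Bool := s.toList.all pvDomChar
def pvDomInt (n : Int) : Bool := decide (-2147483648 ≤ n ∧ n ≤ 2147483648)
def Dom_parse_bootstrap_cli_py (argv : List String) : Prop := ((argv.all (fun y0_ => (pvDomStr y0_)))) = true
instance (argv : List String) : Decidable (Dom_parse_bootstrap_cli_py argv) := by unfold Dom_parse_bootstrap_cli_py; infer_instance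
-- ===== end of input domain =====

-- B replaces A's single interleaved forward fold with two independent backward scans
-- (first match from the right = last occurrence); objective: simpler.


-- ===== PORT A =====
-- literal transliteration of A: one forward pass over enumerate(argv) carrying (provider, output_format)
def parse_bootstrap_cli_py (argv : List String) : String × String :=
  (PySem.List.enumerate argv 0).foldl
    (fun st p =>
      if p.2 = "--provider" ∧ p.1 + 1 < PySem.List.len argv then
        (let s := PySem.Str.strip (PySem.List.pyGetD argv (p.1 + 1) "");
         if s = "" then "-" else s, st.2)
      else if p.2 = "--format" ∧ p.1 + 1 < PySem.List.len argv then
        (st.1,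
         let s := PySem.Str.strip (PySem.List.pyGetD argv (p.1 + 1) "");
         if s = "" then "text" else s)
      else st)
    ("-", "text")

-- ===== PORT B =====
-- transliteration of Source B's `_last_value`: scan i = len-2 .. 0, return at the first hit.
-- The loop over i with pairs (argv[i], argv[i+1]) is ported as first-match over the reversed pair list.
def pvLastValue (argv : List String) (flag default : String) : String :=
  match ((argv.zip argv.tail).reverse).find? (fun p => p.1 == flag) with
  | some p =>
      let value := PySem.Str.strip p.2
      if value = "" then default else value
  | none => default

def parse_bootstrap_cli_py_alt (argv : List String) : String × String :=
  (pvLastValue argv "--provider" "-", pvLastValue argv "--format" "text")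

-- ===== PRECONDITION & SPEC =====
def Spec_parse_bootstrap_cli_py (argv : List String) (out : String × String) : Prop := out = parse_bootstrap_cli_py_alt argv
instance (argv : List String) (out : String × String) : Decidable (Spec_parse_bootstrap_cli_py argv out) := by unfold Spec_parse_bootstrap_cli_py; infer_instance

-- ===== CLAIM (what is proved, stated in full; the proofs are below) =====
def Claim_equal_parse_bootstrap_cli_py : Prop := ∀ (argv : List String), Dom_parse_bootstrap_cli_py argv → Spec_parse_bootstrap_cli_py argv (parse_bootstrap_cli_py argv)

-- ===== LEMMAS AND PROOFS =====

-- proof-side helper: forward last-wins accumulation over the pair list, one flag at a time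
def pvFwd (flag default : String) : List (String × String) → String → String
  | [], cur => cur
  | p :: ps, cur =>
      pvFwd flag default ps
        (if p.1 = flag then
          (let s := PySem.Str.strip p.2; if s = "" then default else s)
         else cur)

-- forward accumulation = first match in the reversed list
lemma pvFwd_eq_find (flag default : String) :
    ∀ (ps : List (String × String)) (cur : String),
      pvFwd flag default ps cur =
        match (ps.reverse).find? (fun p => p.1 == flag) with
        | some p => let s := PySem.Str.strip p.2; if s = "" then default else s
        | none => cur := by
  intro ps
  induction ps with
  | nil => intro cur; simp [pvFwd]
  | cons p ps ih =>
      intro cur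
      rw [pvFwd, ih]
      simp only [List.reverse_cons, List.find?_append]
      cases h : (ps.reverse).find? (fun q => q.1 == flag) with
      | some q => simp
      | none =>
          simp only [Option.none_or]
          by_cases hp : p.1 = flag
          · simp [List.find?, hp]
          · have hb : (p.1 == flag) = false := by simp [hp]
            simp [List.find?, hb, hp]

-- the two-field pair fold is the two independent accumulations
lemma pairFold_eq_fwd :
    ∀ (ps : List (String × String)) (pr fm : String),
      ps.foldl
        (fun st p =>
          if p.1 = "--provider" then
            (let s := PySem.Str.strip p.2; if s = "" then "-" else s, st.2)
          else if p.1 = "--format" then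
            (st.1, let s := PySem.Str.strip p.2; if s = "" then "text" else s)
          else st)
        (pr, fm)
      = (pvFwd "--provider" "-" ps pr, pvFwd "--format" "text" ps fm) := by
  intro ps
  induction ps with
  | nil => intro pr fm; simp [pvFwd]
  | cons p ps ih =>
      intro pr fm
      simp only [List.foldl_cons, pvFwd]
      by_cases h1 : p.1 = "--provider"
      · have h2 : ¬ p.1 = "--format" := by rw [h1]; decide
        simp [h1, h2, ih]
      · by_cases h2 : p.1 = "--format" <;> simp [h1, h2, ih]

-- A's enumerate fold, restricted to the suffix starting at k, equals the pair fold on that suffix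
lemma enumFold_eq_pairFold (argv : List String) :
    ∀ (xs : List String) (k : Nat) (st : String × String),
      argv.drop k = xs →
      (PySem.List.enumerate xs (k : Int)).foldl
        (fun st p =>
          if p.2 = "--provider" ∧ p.1 + 1 < PySem.List.len argv then
            (let s := PySem.Str.strip (PySem.List.pyGetD argv (p.1 + 1) "");
             if s = "" then "-" else s, st.2)
          else if p.2 = "--format" ∧ p.1 + 1 < PySem.List.len argv then
            (st.1,
             let s := PySem.Str.strip (PySem.List.pyGetD argv (p.1 + 1) "");
             if s = "" then "text" else s)
          else st) st
      =
      (xs.zip xs.tail).foldl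
        (fun st p =>
          if p.1 = "--provider" then
            (let s := PySem.Str.strip p.2; if s = "" then "-" else s, st.2)
          else if p.1 = "--format" then
            (st.1, let s := PySem.Str.strip p.2; if s = "" then "text" else s)
          else st) st := by
  intro xs
  induction xs with
  | nil => intro k st h; simp [PySem.List.enumerate]
  | cons x t ih =>
      intro k st h
      have hk : k < argv.length := by
        by_contra hk
        have : argv.drop k = [] := List.drop_eq_nil_of_le (by omega)
        rw [h] at this; exact List.cons_ne_nil _ _ this
      have hdrop : argv.drop (k + 1) = t := by
        have h2 := List.drop_drop (l := argv) (i := 1) (j := k)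
        rw [h] at h2
        simpa [Nat.add_comm] using h2.symm
      rw [PySem.List.enumerate_cons, List.foldl_cons]
      cases t with
      | nil =>
          have hlen : argv.length = k + 1 := by
            have h2 := congrArg List.length hdrop
            simp [List.length_drop] at h2
            omega
          have hguard : ¬ ((k : Int) + 1 < (argv.length : Int)) := by
            rw [hlen]; omega
          simp [PySem.List.enumerate, PySem.List.len, hguard]
      | cons y t' =>
          have hlen : (k : Int) + 1 < (argv.length : Int) := by
            have h2 := congrArg List.length hdrop
            simp [List.length_drop] at h2
            omega
          have hget : PySem.List.pyGetD argv ((k : Int) + 1) "" = y := by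
            have hcast : (k : Int) + 1 = ((k + 1 : Nat) : Int) := by push_cast; ring
            rw [hcast, PySem.List.pyGetD_natCast]
            have : argv[k + 1]? = some y := by
              have h3 : (argv.drop (k + 1))[0]? = argv[k + 1 + 0]? := List.getElem?_drop
              rw [hdrop] at h3
              simpa using h3.symm
            simp [List.getD, this]
          have hrec := ih (k + 1) (st :=
            (fun st (p : Int × String) =>
              if p.2 = "--provider" ∧ p.1 + 1 < PySem.List.len argv then
                (let s := PySem.Str.strip (PySem.List.pyGetD argv (p.1 + 1) "");
                 if s = "" then "-" else s, st.2)
              else if p.2 = "--format" ∧ p.1 + 1 < PySem.List.len argv then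
                (st.1,
                 let s := PySem.Str.strip (PySem.List.pyGetD argv (p.1 + 1) "");
                 if s = "" then "text" else s)
              else st) st ((k : Int), x)) hdrop
          push_cast at hrec
          rw [hrec]
          simp only [List.zip, List.zipWith, List.foldl_cons, List.tail]
          congr 1
          by_cases h1 : x = "--provider"
          · have h2 : ¬ x = "--format" := by rw [h1]; decide
            simp [PySem.List.len, h1, hlen, hget]
          · by_cases h2 : x = "--format" <;>
              simp [PySem.List.len, h1, h2, hlen, hget]

-- ===== VERDICT (by name: the statement is the Claim_ definition above) =====
theorem parse_bootstrap_cli_py_spec : Claim_equal_parse_bootstrap_cli_py := by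
  intro argv _
  show parse_bootstrap_cli_py argv = parse_bootstrap_cli_py_alt argv
  unfold parse_bootstrap_cli_py parse_bootstrap_cli_py_alt pvLastValue
  have h := enumFold_eq_pairFold argv argv 0 ("-", "text") (by simp)
  norm_num at h
  simp only [PySem.List.len]
  rw [h, pairFold_eq_fwd, pvFwd_eq_find, pvFwd_eq_find]
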